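-- pv_equiv track=rewrite | github.com/esun0087/self_parser | ngram/auto_correct.py | get_n_feat
-- ===== SOURCE A (Python) =====
-- def get_n_feat(feat_list, n):
--     ret = [(w, i) for i, w in enumerate(feat_list)]
--     ans = [w for w in feat_list]
--     for j in range(1, n + 1):
--         tmp = []
--         for w, i in ret:
--             if i + 1 < len(feat_list):
--                 tmp.append((w + feat_list[i + 1], i + 1))
--                 ans.append(w + feat_list[i + 1])
--         ret = tmp
--     return ans
-- ===== SOURCE B (Python) =====
-- def get_n_feat(feat_list, n):
--     m = len(feat_list)
--     ans = list(feat_list)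
--     for L in range(2, n + 2):
--         for i in range(m - L + 1):
--             ans.append("".join(feat_list[i:i+L]))
--     return ans
-- ===== Notes on version B (the rewrite author's own statement) =====
-- stated objective: idiomatic
-- what changed: B builds each n-gram directly by start index and length as "".join(feat_list[i:i+L]) in two index loops, instead of A's carrying and extending a list of (prefix, end-index) pairs level by level.
import Mathlib
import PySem

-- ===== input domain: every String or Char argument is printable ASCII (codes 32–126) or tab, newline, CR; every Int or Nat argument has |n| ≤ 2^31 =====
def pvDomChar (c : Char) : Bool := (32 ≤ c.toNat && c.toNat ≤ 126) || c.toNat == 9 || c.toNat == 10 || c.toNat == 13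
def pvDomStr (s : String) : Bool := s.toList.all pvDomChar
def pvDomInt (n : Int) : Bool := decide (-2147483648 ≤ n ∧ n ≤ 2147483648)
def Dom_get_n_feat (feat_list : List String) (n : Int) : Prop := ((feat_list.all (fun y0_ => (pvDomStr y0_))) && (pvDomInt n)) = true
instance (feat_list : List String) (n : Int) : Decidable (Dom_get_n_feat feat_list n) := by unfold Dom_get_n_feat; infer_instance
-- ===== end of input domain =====

-- B builds each n-gram directly by start index and length as ''.join(feat_list[i:i+L])
-- instead of A's level-by-level extension of (prefix, end-index) pairs; same values, simpler.

-- ===== PORT A =====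
def get_n_feat (feat_list : List String) (n : Int) : List String :=
  let ret : List (String × Int) := (PySem.List.enumerate feat_list).map (fun p => (p.2, p.1))
  let ans : List String := feat_list.map (fun w => w)
  let st := (PySem.List.pyRange 1 (n+1) 1).foldl
    (fun (st : List (String × Int) × List String) _ =>
      st.1.foldl (fun (acc : List (String × Int) × List String) wi =>
          if wi.2 + 1 < (feat_list.length : Int) then
            (acc.1 ++ [(wi.1 ++ PySem.List.pyGetD feat_list (wi.2+1) "", wi.2+1)],
             acc.2 ++ [wi.1 ++ PySem.List.pyGetD feat_list (wi.2+1) ""])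
          else acc) ([], st.2)) (ret, ans)
  st.2

-- ===== PORT B =====
def get_n_feat_alt (feat_list : List String) (n : Int) : List String :=
  let m : Int := feat_list.length
  (PySem.List.pyRange 2 (n+2) 1).foldl (fun ans L =>
    (PySem.List.pyRange 0 (m - L + 1) 1).foldl (fun ans i =>
      ans ++ [PySem.Str.join "" (PySem.List.slice feat_list (some i) (some (i+L)))]) ans) feat_list

-- ===== PRECONDITION & SPEC =====
def Spec_get_n_feat (feat_list : List String) (n : Int) (out : List String) : Prop := out = get_n_feat_alt feat_list n
instance (feat_list : List String) (n : Int) (out : List String) : Decidable (Spec_get_n_feat feat_list n out) := by unfold Spec_get_n_feat; infer_instance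

-- ===== CLAIM (what is proved, stated in full; the proofs are below) =====
def Claim_equal_get_n_feat : Prop := ∀ (feat_list : List String) (n : Int), Dom_get_n_feat feat_list n → Spec_get_n_feat feat_list n (get_n_feat feat_list n)

-- ===== LEMMAS AND PROOFS =====

-- gram fl s L = concatenation of fl[s], fl[s+1], …, fl[s+L-1]
def gram (fl : List String) (s : Nat) : Nat → String
  | 0 => ""
  | L+1 => gram fl s L ++ fl.getD (s+L) ""

-- all grams of length k+2 (starts s with s+k+1 < len), in start order
def level2 (fl : List String) (k : Nat) : List String :=
  (List.range (fl.length - (k+1))).map (fun s => gram fl s (k+2))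

-- ret after j loop iterations of A
def retPairs (fl : List String) (j : Nat) : List (String × Int) :=
  (List.range (fl.length - j)).map (fun s => (gram fl s (j+1), ((s+j : Nat) : Int)))

-- A's one outer-loop step
def stepA (fl : List String) (st : List (String × Int) × List String) :
    List (String × Int) × List String :=
  st.1.foldl (fun (acc : List (String × Int) × List String) wi =>
      if wi.2 + 1 < (fl.length : Int) then
        (acc.1 ++ [(wi.1 ++ PySem.List.pyGetD fl (wi.2+1) "", wi.2+1)],
         acc.2 ++ [wi.1 ++ PySem.List.pyGetD fl (wi.2+1) ""])
      else acc) ([], st.2)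

lemma gram_one (fl : List String) (s : Nat) : gram fl s 1 = fl.getD s "" := by
  simp [gram]

lemma range_filter_lt (a b : Nat) :
    (List.range a).filter (fun s => decide (s < b)) = List.range (min a b) := by
  induction a with
  | zero => simp
  | succ a ih =>
    by_cases h : a < b
    · rw [List.range_succ, List.filter_append, ih,
        Nat.min_eq_left (by omega : a ≤ b), Nat.min_eq_left (by omega : a + 1 ≤ b),
        List.range_succ]
      simp [h]
    · rw [List.range_succ, List.filter_append, ih]
      simp [h, Nat.min_eq_right (by omega : b ≤ a), Nat.min_eq_right (by omega : b ≤ a + 1)]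

lemma stepA_eq (fl : List String) (j : Nat) (a : List String) :
    stepA fl (retPairs fl j, a) = (retPairs fl (j+1), a ++ level2 fl j) := by
  unfold stepA retPairs level2
  have hb : (fun (acc : List (String × Int) × List String) (wi : String × Int) =>
      if wi.2 + 1 < (fl.length : Int) then
        (acc.1 ++ [(wi.1 ++ PySem.List.pyGetD fl (wi.2+1) "", wi.2+1)],
         acc.2 ++ [wi.1 ++ PySem.List.pyGetD fl (wi.2+1) ""])
      else acc)
    = (fun acc wi =>
        ((fun (l : List (String × Int)) (wi : String × Int) =>
            if wi.2 + 1 < (fl.length : Int) then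
              l ++ [(wi.1 ++ PySem.List.pyGetD fl (wi.2+1) "", wi.2+1)] else l) acc.1 wi,
         (fun (l : List String) (wi : String × Int) =>
            if wi.2 + 1 < (fl.length : Int) then
              l ++ [wi.1 ++ PySem.List.pyGetD fl (wi.2+1) ""] else l) acc.2 wi)) := by
    funext acc wi
    by_cases h : wi.2 + 1 < (fl.length : Int) <;> simp [h]
  rw [hb]
  rw [PySem.List.foldl_prod_mk
        (f := fun (l : List (String × Int)) (wi : String × Int) =>
          if wi.2 + 1 < (fl.length : Int) then
            l ++ [(wi.1 ++ PySem.List.pyGetD fl (wi.2+1) "", wi.2+1)] else l)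
        (g := fun (l : List String) (wi : String × Int) =>
          if wi.2 + 1 < (fl.length : Int) then
            l ++ [wi.1 ++ PySem.List.pyGetD fl (wi.2+1) ""] else l),
      PySem.List.foldl_append_ite, PySem.List.foldl_append_ite]
  rw [List.filter_map]
  have hp : ((fun (wi : String × Int) => decide (wi.2 + 1 < (fl.length : Int))) ∘
        (fun s => (gram fl s (j+1), ((s+j : Nat) : Int))))
      = (fun s => decide (s < fl.length - (j+1))) := by
    funext s
    simp only [Function.comp_apply, decide_eq_decide]
    omega
  rw [hp, range_filter_lt, Nat.min_eq_right (by omega), List.map_map, List.map_map]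
  simp only [Prod.mk.injEq, List.nil_append]
  constructor
  · apply List.map_congr_left
    intro s _
    simp only [Function.comp_apply]
    have hc : ((s+j : Nat) : Int) + 1 = ((s+j+1 : Nat) : Int) := by push_cast; ring
    rw [hc, PySem.List.pyGetD_natCast]
    rfl
  · congr 1
    apply List.map_congr_left
    intro s _
    simp only [Function.comp_apply]
    have hc : ((s+j : Nat) : Int) + 1 = ((s+j+1 : Nat) : Int) := by push_cast; ring
    rw [hc, PySem.List.pyGetD_natCast]
    rfl

lemma iterA (fl : List String) :
    ∀ (m j : Nat) (a : List String),
      (stepA fl)^[m] (retPairs fl j, a) =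
        (retPairs fl (j+m), a ++ (List.range m).flatMap (fun t => level2 fl (j+t))) := by
  intro m
  induction m with
  | zero => intro j a; simp
  | succ m ih =>
    intro j a
    rw [Function.iterate_succ_apply, stepA_eq, ih]
    simp only [Prod.mk.injEq]
    constructor
    · simp [Nat.add_assoc, Nat.add_comm 1 m]
    · rw [List.append_assoc]
      congr 1
      rw [List.range_succ_eq_map]
      simp [List.flatMap_cons, List.flatMap_map]
      congr 1
      funext t
      congr 1
      omega

lemma foldl_ignore_iterate {α β : Type} (g : α → α) (xs : List β) (a : α) :
    xs.foldl (fun st _ => g st) a = g^[xs.length] a := by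
  induction xs generalizing a with
  | nil => simp
  | cons x xs ih => simp [List.foldl_cons, ih, Function.iterate_succ_apply]

lemma enum_gen (fl : List String) :
    ∀ (s0 : Int), (PySem.List.enumerate fl s0).map (fun p => (p.2, p.1))
      = (List.range fl.length).map (fun s => (fl.getD s "", s0 + (s : Int))) := by
  induction fl with
  | nil => intro s0; simp [PySem.List.enumerate_nil]
  | cons x xs ih =>
    intro s0
    rw [PySem.List.enumerate_cons, List.map_cons, ih]
    simp only [List.length_cons, List.range_succ_eq_map, List.map_cons, List.map_map]
    congr 1
    · simp
    · apply List.map_congr_left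
      intro s _
      simp only [Function.comp_apply, List.getD_cons_succ, Prod.mk.injEq]
      refine ⟨trivial, by push_cast; ring⟩

lemma enum_eq (fl : List String) :
    (PySem.List.enumerate fl).map (fun p => (p.2, p.1)) = retPairs fl 0 := by
  rw [enum_gen]
  unfold retPairs
  apply List.map_congr_left
  intro s _
  simp [gram_one]

lemma A_char (fl : List String) (n : Int) :
    get_n_feat fl n = fl ++ (List.range n.toNat).flatMap (level2 fl) := by
  show ((PySem.List.pyRange 1 (n+1) 1).foldl (fun st _ => stepA fl st)
      ((PySem.List.enumerate fl).map (fun p => (p.2, p.1)), fl.map (fun w => w))).2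
    = fl ++ (List.range n.toNat).flatMap (level2 fl)
  rw [foldl_ignore_iterate, enum_eq, List.map_id', PySem.List.length_pyRange_one]
  have : (n + 1 - 1).toNat = n.toNat := by omega
  rw [this, iterA]
  simp

lemma joinE_flatten : ∀ (xs : List (List Char)), PySem.Chars.join [] xs = xs.flatten := by
  intro xs
  induction xs with
  | nil => simp [PySem.Chars.join_nil]
  | cons p rest ih =>
    cases rest with
    | nil => simp [PySem.Chars.join_singleton]
    | cons q rest' =>
      rw [PySem.Chars.join_cons_cons, ih]
      simp

lemma strJoinE_append (xs ys : List String) :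
    PySem.Str.join "" (xs ++ ys) = PySem.Str.join "" xs ++ PySem.Str.join "" ys := by
  simp [PySem.Str.join, joinE_flatten]

lemma join_gram (fl : List String) (s : Nat) : ∀ (L : Nat),
    PySem.Str.join "" ((fl.drop s).take L) = gram fl s L := by
  intro L
  induction L with
  | zero => rfl
  | succ L ih =>
    rw [List.take_add_one, strJoinE_append, ih]
    have hg : gram fl s (L+1) = gram fl s L ++ fl.getD (s+L) "" := rfl
    rw [hg]
    congr 1
    rw [List.getElem?_drop, List.getD_eq_getElem?_getD]
    cases h : fl[s+L]? with
    | none => simp [PySem.Str.join, PySem.Chars.join_nil]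
    | some x => simp [PySem.Str.join, PySem.Chars.join_singleton, String.ofList_toList]

lemma join_slice (fl : List String) (s k : Nat) :
    PySem.Str.join "" (PySem.List.slice fl (some (s:Int)) (some ((s:Int) + (2+(k:Int)))))
      = gram fl s (k+2) := by
  have hb : (s:Int) + (2+(k:Int)) = (s:Int) + ((k+2 : Nat) : Int) := by push_cast; ring
  rw [hb, PySem.List.slice_natCast_add, join_gram]

lemma B_inner (fl : List String) (k : Nat) (ans : List String) :
    (PySem.List.pyRange 0 ((fl.length:Int) - (2+(k:Int)) + 1) 1).foldl
      (fun ans i =>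
        ans ++ [PySem.Str.join "" (PySem.List.slice fl (some i) (some (i+(2+(k:Int)))))]) ans
    = ans ++ level2 fl k := by
  rw [PySem.List.pyRange_one]
  have hl : (((fl.length:Int) - (2+(k:Int)) + 1) - 0).toNat = fl.length - (k+1) := by omega
  rw [hl, List.foldl_map]
  have hcong : ∀ (a : List String) (s : Nat), s ∈ List.range (fl.length - (k+1)) →
      a ++ [PySem.Str.join "" (PySem.List.slice fl (some ((0:Int)+(s:Int)))
        (some ((0:Int)+(s:Int)+(2+(k:Int)))))]
      = a ++ [gram fl s (k+2)] := by
    intro a s _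
    simp only [zero_add]
    rw [join_slice]
  refine (PySem.List.foldl_congr_mem _ _ (fun (a : List String) (s : Nat) => a ++ [gram fl s (k+2)]) ans hcong).trans ?_
  rw [PySem.List.foldl_append_singleton_eq_map]
  rfl

lemma B_char (fl : List String) (n : Int) :
    get_n_feat_alt fl n = fl ++ (List.range n.toNat).flatMap (level2 fl) := by
  dsimp only [get_n_feat_alt]
  rw [PySem.List.pyRange_one]
  have h2 : (n+2-2).toNat = n.toNat := by omega
  rw [h2, List.foldl_map]
  have hcong : ∀ (a : List String) (k : Nat), k ∈ List.range n.toNat →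
      (PySem.List.pyRange 0 ((fl.length:Int) - (2+(k:Int)) + 1) 1).foldl
        (fun ans i =>
          ans ++ [PySem.Str.join "" (PySem.List.slice fl (some i) (some (i+(2+(k:Int)))))]) a
      = a ++ level2 fl k := by
    intro a k _
    exact B_inner fl k a
  exact (PySem.List.foldl_congr_mem _ _ (fun (a : List String) (k : Nat) => a ++ level2 fl k) fl hcong).trans
    (PySem.List.foldl_append_eq_flatMap _ _ _)

-- ===== VERDICT (by name: the statement is the Claim_ definition above) =====
theorem get_n_feat_spec : Claim_equal_get_n_feat := by
  intro fl n _
  show get_n_feat fl n = get_n_feat_alt fl n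
  rw [A_char, B_char]
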